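-- pv_equiv track=rewrite | github.com/namtonthat/apple-health-data | scripts/generate_streamlit_secrets.py | generate_secrets_toml
-- ===== SOURCE A (Python) =====
-- def generate_secrets_toml(env_vars: dict[str, str]) -> str:
--     """Generate secrets.toml content from env vars."""
--     lines = [
--         "# =============================================================================",
--         "# Streamlit Cloud Secrets",
--         "# =============================================================================",
--         "# Copy this into Streamlit Cloud: Settings → Secrets",
--         "#",
--         "# These are SENSITIVE values only. Non-sensitive config (bucket names, goals)",
--         "# is stored in pyproject.toml under [tool.dashboard].",
--         "# =============================================================================",
--         "",
--     ]
--
--     # AWS credentials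
--     lines.append("# AWS Credentials (REQUIRED)")
--     for key in ["AWS_ACCESS_KEY_ID", "AWS_SECRET_ACCESS_KEY"]:
--         if key in env_vars:
--             lines.append(f'{key} = "{env_vars[key]}"')
--     lines.append("")
--
--     # Strava (optional)
--     strava_keys = ["STRAVA_CLIENT_ID", "STRAVA_CLIENT_SECRET", "STRAVA_REFRESH_TOKEN"]
--     if any(k in env_vars for k in strava_keys):
--         lines.append("# Strava API (OPTIONAL)")
--         for key in strava_keys:
--             if key in env_vars:
--                 lines.append(f'{key} = "{env_vars[key]}"')
--         lines.append("")
--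
--     # Hevy (optional)
--     if "HEVY_API_KEY" in env_vars:
--         lines.append("# Hevy API (OPTIONAL)")
--         lines.append(f'HEVY_API_KEY = "{env_vars["HEVY_API_KEY"]}"')
--
--     return "\n".join(lines).rstrip() + "\n"
-- ===== SOURCE B (Python) =====
-- def generate_secrets_toml(env_vars: dict[str, str]) -> str:
--     """Generate secrets.toml content from env vars (table-driven)."""
--     sections = [
--         ("# AWS Credentials (REQUIRED)",
--          ["AWS_ACCESS_KEY_ID", "AWS_SECRET_ACCESS_KEY"], True),
--         ("# Strava API (OPTIONAL)",
--          ["STRAVA_CLIENT_ID", "STRAVA_CLIENT_SECRET", "STRAVA_REFRESH_TOKEN"], False),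
--         ("# Hevy API (OPTIONAL)",
--          ["HEVY_API_KEY"], False),
--     ]
--     lines = [
--         "# =============================================================================",
--         "# Streamlit Cloud Secrets",
--         "# =============================================================================",
--         "# Copy this into Streamlit Cloud: Settings → Secrets",
--         "#",
--         "# These are SENSITIVE values only. Non-sensitive config (bucket names, goals)",
--         "# is stored in pyproject.toml under [tool.dashboard].",
--         "# =============================================================================",
--         "",
--     ]
--     for header, keys, always in sections:
--         present = [k for k in keys if k in env_vars]
--         if always or present:
--             lines.append(header)
--             lines.extend(f'{k} = "{env_vars[k]}"' for k in present)
--             lines.append("")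
--     return "\n".join(lines).rstrip() + "\n"
-- ===== Notes on version B (the rewrite author's own statement) =====
-- stated objective: simpler
-- what changed: Replaces the three hand-unrolled section blocks with one table-driven loop over (header, keys, header_always) section specs; the final rstrip keeps the output identical.
import Mathlib
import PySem

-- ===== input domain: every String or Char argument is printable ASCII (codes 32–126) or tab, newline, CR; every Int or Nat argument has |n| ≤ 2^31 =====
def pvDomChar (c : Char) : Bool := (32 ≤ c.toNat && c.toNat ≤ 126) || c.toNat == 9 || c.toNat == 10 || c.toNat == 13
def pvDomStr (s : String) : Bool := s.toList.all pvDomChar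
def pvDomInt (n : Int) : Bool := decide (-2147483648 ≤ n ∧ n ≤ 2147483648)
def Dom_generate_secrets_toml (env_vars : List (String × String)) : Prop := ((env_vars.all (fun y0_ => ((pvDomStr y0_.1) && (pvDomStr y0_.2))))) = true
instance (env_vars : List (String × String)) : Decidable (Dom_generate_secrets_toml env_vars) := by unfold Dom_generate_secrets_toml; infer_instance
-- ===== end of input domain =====

-- B replaces A's three hand-unrolled section blocks by one table-driven loop over section
-- specs (objective: simpler); same output string for every input.

-- ===== PORT A =====
-- the fixed banner block at the top of the file (shared literal of both Python sources)
def pvBanner : List String :=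
  [ "# =============================================================================",
    "# Streamlit Cloud Secrets",
    "# =============================================================================",
    "# Copy this into Streamlit Cloud: Settings → Secrets",
    "#",
    "# These are SENSITIVE values only. Non-sensitive config (bucket names, goals)",
    "# is stored in pyproject.toml under [tool.dashboard].",
    "# =============================================================================",
    "" ]

-- A's lines list: banner, then the AWS block, the conditional Strava block, the
-- conditional Hevy block, exactly as in the Python (env_vars[key] is only read under
-- 'key in env_vars', so getD "" is exact there)
def pvLinesA (d : PySem.Dict String String) : List String :=
  let lines := pvBanner
  let lines := lines ++ ["# AWS Credentials (REQUIRED)"]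
  let lines := ["AWS_ACCESS_KEY_ID", "AWS_SECRET_ACCESS_KEY"].foldl
    (fun acc key => if d.contains key then acc ++ [key ++ " = \"" ++ d.getD key "" ++ "\""] else acc) lines
  let lines := lines ++ [""]
  let strava_keys := ["STRAVA_CLIENT_ID", "STRAVA_CLIENT_SECRET", "STRAVA_REFRESH_TOKEN"]
  let lines :=
    if strava_keys.any (fun k => d.contains k) then
      (strava_keys.foldl
        (fun acc key => if d.contains key then acc ++ [key ++ " = \"" ++ d.getD key "" ++ "\""] else acc)
        (lines ++ ["# Strava API (OPTIONAL)"])) ++ [""]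
    else lines
  let lines :=
    if d.contains "HEVY_API_KEY" then
      lines ++ ["# Hevy API (OPTIONAL)", "HEVY_API_KEY = \"" ++ d.getD "HEVY_API_KEY" "" ++ "\""]
    else lines
  lines

def generate_secrets_toml (env_vars : List (String × String)) : String :=
  PySem.Str.rstrip (PySem.Str.join "\n" (pvLinesA (PySem.Dict.mk env_vars))) ++ "\n"

-- ===== PORT B =====
-- one section of B: header, the lines of the present keys, a trailing blank — or nothing
def pvSection (d : PySem.Dict String String) (header : String) (keys : List String) (always : Bool) : List String :=
  let present := keys.filter (fun k => d.contains k)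
  if always || !present.isEmpty then
    header :: present.map (fun k => k ++ " = \"" ++ d.getD k "" ++ "\"") ++ [""]
  else []

def pvSections : List (String × List String × Bool) :=
  [ ("# AWS Credentials (REQUIRED)", ["AWS_ACCESS_KEY_ID", "AWS_SECRET_ACCESS_KEY"], true),
    ("# Strava API (OPTIONAL)", ["STRAVA_CLIENT_ID", "STRAVA_CLIENT_SECRET", "STRAVA_REFRESH_TOKEN"], false),
    ("# Hevy API (OPTIONAL)", ["HEVY_API_KEY"], false) ]

def generate_secrets_toml_alt (env_vars : List (String × String)) : String :=
  PySem.Str.rstrip (PySem.Str.join "\n"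
    (pvSections.foldl (fun acc s => acc ++ pvSection (PySem.Dict.mk env_vars) s.1 s.2.1 s.2.2) pvBanner)) ++ "\n"

-- ===== PRECONDITION & SPEC =====
def Spec_generate_secrets_toml (env_vars : List (String × String)) (out : String) : Prop := out = generate_secrets_toml_alt env_vars
instance (env_vars : List (String × String)) (out : String) : Decidable (Spec_generate_secrets_toml env_vars out) := by unfold Spec_generate_secrets_toml; infer_instance

-- ===== CLAIM (what is proved, stated in full; the proofs are below) =====
def Claim_equal_generate_secrets_toml : Prop := ∀ (env_vars : List (String × String)), Dom_generate_secrets_toml env_vars → Spec_generate_secrets_toml env_vars (generate_secrets_toml env_vars)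

-- ===== LEMMAS AND PROOFS =====

-- the key = "value" line, as both Pythons format it
def pvFmt (d : PySem.Dict String String) (k : String) : String := k ++ " = \"" ++ d.getD k "" ++ "\""

def pvStravaKeys : List String := ["STRAVA_CLIENT_ID", "STRAVA_CLIENT_SECRET", "STRAVA_REFRESH_TOKEN"]

-- A's line list in closed form: banner, AWS block, conditional Strava block, conditional Hevy block
theorem pv_linesA_eq (d : PySem.Dict String String) :
    pvLinesA d =
      (pvBanner ++ ("# AWS Credentials (REQUIRED)" ::
        ((["AWS_ACCESS_KEY_ID", "AWS_SECRET_ACCESS_KEY"].filter (fun k => d.contains k)).map (pvFmt d) ++ [""])))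
      ++ ((if pvStravaKeys.any (fun k => d.contains k) then
            "# Strava API (OPTIONAL)" :: ((pvStravaKeys.filter (fun k => d.contains k)).map (pvFmt d) ++ [""])
          else [])
      ++ (if d.contains "HEVY_API_KEY" then ["# Hevy API (OPTIONAL)", pvFmt d "HEVY_API_KEY"] else [])) := by
  simp only [pvLinesA]
  rw [PySem.List.foldl_append_if, PySem.List.foldl_append_if]
  by_cases hs : (["STRAVA_CLIENT_ID", "STRAVA_CLIENT_SECRET", "STRAVA_REFRESH_TOKEN"].any
      (fun k => d.contains k)) = true <;>
    by_cases hh : d.contains "HEVY_API_KEY" = true <;>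
      (simp [pvStravaKeys, hs, hh, pvFmt, List.append_assoc]; try rfl)

-- B's lines are A's lines plus a trailing blank exactly when the Hevy section fires
theorem pv_linesB_eq (d : PySem.Dict String String) :
    pvSections.foldl (fun acc s => acc ++ pvSection d s.1 s.2.1 s.2.2) pvBanner
      = pvLinesA d ++ (if d.contains "HEVY_API_KEY" then [""] else []) := by
  rw [pv_linesA_eq]
  simp only [pvSections, List.foldl_cons, List.foldl_nil, pvSection, Bool.true_or,
    Bool.false_or, if_true]
  by_cases h1 : d.contains "STRAVA_CLIENT_ID" = true <;>
  by_cases h2 : d.contains "STRAVA_CLIENT_SECRET" = true <;>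
  by_cases h3 : d.contains "STRAVA_REFRESH_TOKEN" = true <;>
  by_cases hh : d.contains "HEVY_API_KEY" = true <;>
    (simp [pvStravaKeys, h1, h2, h3, hh, pvFmt, List.filter_cons, List.append_assoc]; try rfl)

-- appending an empty string to a nonempty line list appends one separator to the join
theorem pv_join_append_empty (x : String) (xs : List String) :
    PySem.Str.join "\n" ((x :: xs) ++ [""]) = PySem.Str.join "\n" (x :: xs) ++ "\n" := by
  have e : ∀ (a b : List Char) (zs : List (List Char)),
      ['\n'].intercalate (a :: b :: zs) = a ++ ['\n'] ++ ['\n'].intercalate (b :: zs) := by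
    intro a b zs; simp [List.intercalate, List.intersperse]
  have key : ∀ (ts : List (List Char)) (cs : List Char),
      ['\n'].intercalate (cs :: (ts ++ [[]])) = ['\n'].intercalate (cs :: ts) ++ ['\n'] := by
    intro ts
    induction ts with
    | nil => intro cs; simp [List.intercalate, List.intersperse]
    | cons b t ih =>
      intro cs
      have h1 := e cs b (t ++ [[]])
      have h2 := e cs b t
      simp only [List.cons_append]
      rw [h1, ih b, h2]
      simp [List.append_assoc]
  have hnl : "\n".toList = ['\n'] := rfl
  simp [PySem.Str.join, PySem.Chars.join, hnl, key]

-- Python's rstrip ignores a trailing newline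
theorem pv_rstrip_append_newline (s : String) :
    PySem.Str.rstrip (s ++ "\n") = PySem.Str.rstrip s := by
  have h : PySem.Chars.isspace '\n' = true := by decide
  simp [PySem.Str.rstrip, PySem.Chars.rstrip, String.toList_append, h]

-- A's line list always starts with the first banner line
theorem pv_linesA_cons (d : PySem.Dict String String) :
    ∃ xs, pvLinesA d =
      "# =============================================================================" :: xs := by
  rw [pv_linesA_eq]
  simp only [pvBanner, List.cons_append]
  exact ⟨_, rfl⟩

-- ===== VERDICT (by name: the statement is the Claim_ definition above) =====
theorem generate_secrets_toml_spec : Claim_equal_generate_secrets_toml := by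
  intro env_vars _
  unfold Spec_generate_secrets_toml
  simp only [generate_secrets_toml, generate_secrets_toml_alt]
  rw [pv_linesB_eq]
  by_cases hh : (PySem.Dict.mk env_vars).contains "HEVY_API_KEY" = true
  · obtain ⟨xs, hx⟩ := pv_linesA_cons (PySem.Dict.mk env_vars)
    rw [hx]
    simp only [hh, if_true]
    rw [pv_join_append_empty, pv_rstrip_append_newline]
  · simp [hh]
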